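-- pv_equiv track=rewrite | github.com/NavniMahendroo/ML-Project---TRIAGEGEIST | backend/src/triage/fallback.py | _keyword_urgency
-- ===== SOURCE A (Python) =====
-- _CRITICAL_KEYWORDS = [
--     "cardiac arrest", "unresponsive", "not breathing", "cpr",
--     "anaphylaxis", "severe hemorrhage", "massive bleeding",
-- ]
--
-- _EMERGENT_KEYWORDS = [
--     "chest pain", "stroke", "seizure", "overdose", "difficulty breathing",
--     "shortness of breath", "severe pain", "crushing", "stabbing",
--     "head injury", "unconscious", "altered mental status",
--     "suicidal", "self-harm", "poisoning",
-- ]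
--
-- _URGENT_KEYWORDS = [
--     "abdominal pain", "fracture", "laceration", "vomiting blood",
--     "high fever", "asthma attack", "diabetic", "infection",
--     "dehydration", "dizziness", "fainting",
-- ]
--
-- def _keyword_urgency(text: str) -> int:
--     """Return 1-5 based on keyword matching. 5 means no keyword match."""
--     lower = text.lower()
--     for kw in _CRITICAL_KEYWORDS:
--         if kw in lower:
--             return 1
--     for kw in _EMERGENT_KEYWORDS:
--         if kw in lower:
--             return 2
--     for kw in _URGENT_KEYWORDS:
--         if kw in lower:
--             return 3
--     return 5  # no concerning keywords
-- ===== SOURCE B (Python) =====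
-- _CRITICAL_KEYWORDS = [
--     "cardiac arrest", "unresponsive", "not breathing", "cpr",
--     "anaphylaxis", "severe hemorrhage", "massive bleeding",
-- ]
--
-- _EMERGENT_KEYWORDS = [
--     "chest pain", "stroke", "seizure", "overdose", "difficulty breathing",
--     "shortness of breath", "severe pain", "crushing", "stabbing",
--     "head injury", "unconscious", "altered mental status",
--     "suicidal", "self-harm", "poisoning",
-- ]
--
-- _URGENT_KEYWORDS = [
--     "abdominal pain", "fracture", "laceration", "vomiting blood",
--     "high fever", "asthma attack", "diabetic", "infection",
--     "dehydration", "dizziness", "fainting",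
-- ]
--
-- _GROUPS = [(1, _CRITICAL_KEYWORDS), (2, _EMERGENT_KEYWORDS), (3, _URGENT_KEYWORDS)]
--
-- def _keyword_urgency(text: str) -> int:
--     """Return 1-5 based on keyword matching. 5 means no keyword match."""
--     lower = text.lower()
--     matched = [lvl for lvl, kws in _GROUPS if any(kw in lower for kw in kws)]
--     return min(matched, default=5)
-- ===== Notes on version B (the rewrite author's own statement) =====
-- stated objective: alternative
-- what changed: Replaced A's three ordered keyword loops with early returns by a data-driven (level, keywords) table: B collects every level whose group has a substring hit and returns the minimum with default 5, which coincides with A's priority order because the levels are numerically ordered.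
import Mathlib
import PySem

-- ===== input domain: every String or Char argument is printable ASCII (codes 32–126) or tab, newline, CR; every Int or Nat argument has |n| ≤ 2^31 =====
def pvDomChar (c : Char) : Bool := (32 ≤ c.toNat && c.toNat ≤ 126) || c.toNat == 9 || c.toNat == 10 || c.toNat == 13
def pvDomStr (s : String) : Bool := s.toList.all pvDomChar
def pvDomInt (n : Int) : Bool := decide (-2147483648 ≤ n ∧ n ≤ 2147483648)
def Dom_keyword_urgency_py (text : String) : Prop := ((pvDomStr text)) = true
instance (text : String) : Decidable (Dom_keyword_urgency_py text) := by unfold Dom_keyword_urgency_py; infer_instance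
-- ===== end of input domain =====

-- B replaces A's three ordered early-return keyword loops by a (level, keywords) table:
-- collect all matching levels, return their minimum with default 5 (same result; alternative decomposition).


-- ===== PORT A =====
def criticalKeywords : List String :=
  ["cardiac arrest", "unresponsive", "not breathing", "cpr",
   "anaphylaxis", "severe hemorrhage", "massive bleeding"]

def emergentKeywords : List String :=
  ["chest pain", "stroke", "seizure", "overdose", "difficulty breathing",
   "shortness of breath", "severe pain", "crushing", "stabbing",
   "head injury", "unconscious", "altered mental status",
   "suicidal", "self-harm", "poisoning"]

def urgentKeywords : List String :=
  ["abdominal pain", "fracture", "laceration", "vomiting blood",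
   "high fever", "asthma attack", "diabetic", "infection",
   "dehydration", "dizziness", "fainting"]

-- A: lower the text, then three loops with early return (List.any is the early-exit scan).
def keyword_urgency_py (text : String) : Int :=
  let lower := PySem.Str.lower text
  if criticalKeywords.any (fun kw => PySem.Str.isIn kw lower) then 1
  else if emergentKeywords.any (fun kw => PySem.Str.isIn kw lower) then 2
  else if urgentKeywords.any (fun kw => PySem.Str.isIn kw lower) then 3
  else 5

-- ===== PORT B =====
def pvGroups : List (Int × List String) :=
  [(1, criticalKeywords), (2, emergentKeywords), (3, urgentKeywords)]

-- B: collect the levels of all matching groups, take the minimum with default 5.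
def keyword_urgency_py_alt (text : String) : Int :=
  let lower := PySem.Str.lower text
  let matched := (pvGroups.filter (fun g => g.2.any (fun kw => PySem.Str.isIn kw lower))).map (·.1)
  PySem.List.minD matched (fun x => x) 5

-- ===== PRECONDITION & SPEC =====
def Spec_keyword_urgency_py (text : String) (out : Int) : Prop := out = keyword_urgency_py_alt text
instance (text : String) (out : Int) : Decidable (Spec_keyword_urgency_py text out) := by unfold Spec_keyword_urgency_py; infer_instance

-- ===== CLAIM (what is proved, stated in full; the proofs are below) =====
def Claim_equal_keyword_urgency_py : Prop := ∀ (text : String), Dom_keyword_urgency_py text → Spec_keyword_urgency_py text (keyword_urgency_py text)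

-- ===== LEMMAS AND PROOFS =====

-- ===== VERDICT (by name: the statement is the Claim_ definition above) =====
theorem keyword_urgency_py_spec : Claim_equal_keyword_urgency_py := by
  intro text _
  unfold Spec_keyword_urgency_py keyword_urgency_py keyword_urgency_py_alt pvGroups
  simp only [PySem.Str.isIn_eq, PySem.Str.toList_lower]
  cases hc : criticalKeywords.any (fun kw => PySem.Chars.isIn kw.toList (PySem.Chars.lower text.toList)) <;>
  cases he : emergentKeywords.any (fun kw => PySem.Chars.isIn kw.toList (PySem.Chars.lower text.toList)) <;>
  cases hu : urgentKeywords.any (fun kw => PySem.Chars.isIn kw.toList (PySem.Chars.lower text.toList)) <;>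
    simp [List.filter, hc, he, hu, PySem.List.minD, PySem.List.min?]
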